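-- pv_equiv track=rewrite | github.com/wronai/redsl | redsl/commands/github_source.py | _priority_from_labels
-- ===== SOURCE A (Python) =====
-- def _priority_from_labels(labels: list[str]) -> int:
--     """Derive planfile priority (1–4) from GitHub label names."""
--     lowered = {lb.lower() for lb in labels}
--     if lowered & {"critical", "blocker", "p0", "priority: critical"}:
--         return 1
--     if lowered & {"high", "p1", "priority: high", "important"}:
--         return 2
--     if lowered & {"low", "p3", "priority: low", "nice-to-have", "wontfix"}:
--         return 4
--     return 3  # medium default
-- ===== SOURCE B (Python) =====
-- _PRIORITY_MAP = {
--     "critical": 1, "blocker": 1, "p0": 1, "priority: critical": 1,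
--     "high": 2, "p1": 2, "priority: high": 2, "important": 2,
--     "low": 4, "p3": 4, "priority: low": 4, "nice-to-have": 4, "wontfix": 4,
-- }
--
--
-- def _priority_from_labels(labels: list[str]) -> int:
--     """Derive planfile priority (1-4) from GitHub label names."""
--     best = None
--     for lb in labels:
--         p = _PRIORITY_MAP.get(lb.lower())
--         if p is not None and (best is None or p < best):
--             best = p
--     return 3 if best is None else best
-- ===== Notes on version B (the rewrite author's own statement) =====
-- stated objective: simpler
-- what changed: Replaces building a lowered set and testing three set intersections in order with a single pass over the labels keeping the minimum priority found in one label-to-priority table (min works because the tiers are numbered in check order 1 < 2 < 4).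
import Mathlib
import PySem

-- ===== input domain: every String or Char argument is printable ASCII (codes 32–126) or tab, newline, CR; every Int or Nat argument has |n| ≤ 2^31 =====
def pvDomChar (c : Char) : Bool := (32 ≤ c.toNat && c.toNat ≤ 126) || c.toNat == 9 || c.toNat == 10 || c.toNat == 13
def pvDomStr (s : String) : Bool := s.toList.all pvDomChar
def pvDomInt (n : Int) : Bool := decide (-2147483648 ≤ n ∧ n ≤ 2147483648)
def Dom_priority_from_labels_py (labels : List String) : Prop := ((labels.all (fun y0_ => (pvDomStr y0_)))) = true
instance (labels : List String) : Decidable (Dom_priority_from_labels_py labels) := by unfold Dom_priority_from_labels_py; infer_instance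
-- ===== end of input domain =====

-- B replaces A's three ordered set-intersection tests with one label→priority table and a single min-keeping pass (objective: simpler).

-- ===== PORT A =====
-- the three literal sets A intersects with, in A's order
def pvG1 : PySem.Set String := PySem.Set.ofList ["critical", "blocker", "p0", "priority: critical"]
def pvG2 : PySem.Set String := PySem.Set.ofList ["high", "p1", "priority: high", "important"]
def pvG4 : PySem.Set String := PySem.Set.ofList ["low", "p3", "priority: low", "nice-to-have", "wontfix"]

def priority_from_labels_py (labels : List String) : Int :=
  let lowered : PySem.Set String := PySem.Set.ofList (labels.map PySem.Str.lower)
  if PySem.Set.inter lowered pvG1 ≠ [] then 1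
  else if PySem.Set.inter lowered pvG2 ≠ [] then 2
  else if PySem.Set.inter lowered pvG4 ≠ [] then 4
  else 3

-- ===== PORT B =====
def pvPrioMap : PySem.Dict String Int :=
  PySem.Dict.mk ([("critical", 1), ("blocker", 1), ("p0", 1), ("priority: critical", 1),
   ("high", 2), ("p1", 2), ("priority: high", 2), ("important", 2),
   ("low", 4), ("p3", 4), ("priority: low", 4), ("nice-to-have", 4), ("wontfix", 4)] : List (String × Int))

-- loop body of B: update the running best with this label's mapped priority, if any
def pvStep (best : Option Int) (lb : String) : Option Int :=
  match PySem.Dict.get? pvPrioMap (PySem.Str.lower lb) with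
  | none => best
  | some p =>
    match best with
    | none => some p
    | some b => if p < b then some p else best

def priority_from_labels_py_alt (labels : List String) : Int :=
  match labels.foldl pvStep none with
  | none => 3
  | some b => b

-- ===== PRECONDITION & SPEC =====
def Spec_priority_from_labels_py (labels : List String) (out : Int) : Prop := out = priority_from_labels_py_alt labels
instance (labels : List String) (out : Int) : Decidable (Spec_priority_from_labels_py labels out) := by unfold Spec_priority_from_labels_py; infer_instance

-- ===== CLAIM (what is proved, stated in full; the proofs are below) =====
def Claim_equal_priority_from_labels_py : Prop := ∀ (labels : List String), Dom_priority_from_labels_py labels → Spec_priority_from_labels_py labels (priority_from_labels_py labels)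

-- ===== LEMMAS AND PROOFS =====

-- option-min combinator: pvStep acc lb = pvOmin acc (lookup lb)
def pvOmin (a b : Option Int) : Option Int :=
  match a, b with
  | none, b => b
  | a, none => a
  | some x, some y => some (min x y)

lemma pvStep_eq (acc : Option Int) (lb : String) :
    pvStep acc lb = pvOmin acc (PySem.Dict.get? pvPrioMap (PySem.Str.lower lb)) := by
  unfold pvStep pvOmin
  cases h : PySem.Dict.get? pvPrioMap (PySem.Str.lower lb) with
  | none => cases acc <;> rfl
  | some p =>
    cases acc with
    | none => rfl
    | some b => by_cases hpb : p < b <;> simp [hpb] <;> omega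

lemma pvOmin_assoc (a b c : Option Int) : pvOmin (pvOmin a b) c = pvOmin a (pvOmin b c) := by
  cases a <;> cases b <;> cases c <;> simp [pvOmin, min_assoc]

lemma pvOmin_none_left (b : Option Int) : pvOmin none b = b := by
  cases b <;> rfl

lemma pvFold_char (labels : List String) (acc : Option Int) :
    labels.foldl pvStep acc = pvOmin acc (labels.foldl pvStep none) := by
  induction labels generalizing acc with
  | nil => cases acc <;> rfl
  | cons l ls ih =>
    simp only [List.foldl_cons, pvStep_eq]
    rw [ih (pvOmin acc _), ih (pvOmin none _), pvOmin_none_left]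
    exact pvOmin_assoc _ _ _

-- the lookup in B's table, characterised by membership in A's three groups
lemma pvLookup_char (s : String) :
    PySem.Dict.get? pvPrioMap s =
      (if s ∈ pvG1 then some 1 else if s ∈ pvG2 then some 2
       else if s ∈ pvG4 then some (4 : Int) else none) := by
  by_cases h1 : s ∈ pvG1
  · simp only [pvG1, PySem.Set.mem_ofList, List.mem_cons, List.not_mem_nil, or_false] at h1
    rcases h1 with rfl | rfl | rfl | rfl <;> decide
  · by_cases h2 : s ∈ pvG2
    · simp only [pvG2, PySem.Set.mem_ofList, List.mem_cons, List.not_mem_nil, or_false] at h2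
      rcases h2 with rfl | rfl | rfl | rfl <;> decide
    · by_cases h4 : s ∈ pvG4
      · simp only [pvG4, PySem.Set.mem_ofList, List.mem_cons, List.not_mem_nil, or_false] at h4
        rcases h4 with rfl | rfl | rfl | rfl | rfl <;> decide
      · simp only [h1, h2, h4, if_false]
        simp only [pvG1, pvG2, pvG4, PySem.Set.mem_ofList, List.mem_cons, List.not_mem_nil,
          or_false, not_or] at h1 h2 h4
        obtain ⟨n1, n2, n3, n4⟩ := h1
        obtain ⟨n5, n6, n7, n8⟩ := h2
        obtain ⟨n9, n10, n11, n12, n13⟩ := h4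
        simp [pvPrioMap, PySem.Dict.get?]
        exact ⟨Ne.symm n1, Ne.symm n2, Ne.symm n3, Ne.symm n4, Ne.symm n5, Ne.symm n6,
          Ne.symm n7, Ne.symm n8, Ne.symm n9, Ne.symm n10, Ne.symm n11, Ne.symm n12, Ne.symm n13⟩

-- A's result characterised by the three any-tests
def pvC (labels : List String) (g : PySem.Set String) : Bool :=
  labels.any (fun lb => PySem.Str.lower lb ∈ g)

lemma pvInter_nil_iff (labels : List String) (g : PySem.Set String) :
    PySem.Set.inter (PySem.Set.ofList (labels.map PySem.Str.lower)) g = [] ↔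
      pvC labels g = false := by
  simp [PySem.Set.inter, List.filter_eq_nil_iff, pvC, List.any_eq_false, PySem.Set.mem_ofList]

-- B's fold characterised the same way
lemma pvFold_eq (labels : List String) :
    labels.foldl pvStep none =
      (if pvC labels pvG1 then some 1 else if pvC labels pvG2 then some 2
       else if pvC labels pvG4 then some (4 : Int) else none) := by
  induction labels with
  | nil => rfl
  | cons l ls ih =>
    have h := pvFold_char ls (pvStep none l)
    simp only [List.foldl_cons] at h ⊢
    rw [h, ih, pvStep_eq, pvOmin_none_left, pvLookup_char]
    simp only [pvC, List.any_cons]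
    by_cases h1 : PySem.Str.lower l ∈ pvG1 <;>
    by_cases h2 : PySem.Str.lower l ∈ pvG2 <;>
    by_cases h4 : PySem.Str.lower l ∈ pvG4 <;>
    by_cases hb1 : (ls.any fun lb => decide (PySem.Str.lower lb ∈ pvG1)) = true <;>
    by_cases hb2 : (ls.any fun lb => decide (PySem.Str.lower lb ∈ pvG2)) = true <;>
    by_cases hb4 : (ls.any fun lb => decide (PySem.Str.lower lb ∈ pvG4)) = true <;>
    simp [pvOmin, h1, h2, h4, hb1, hb2, hb4]

-- ===== VERDICT (by name: the statement is the Claim_ definition above) =====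
theorem priority_from_labels_py_spec : Claim_equal_priority_from_labels_py := by
  intro labels _
  unfold Spec_priority_from_labels_py priority_from_labels_py priority_from_labels_py_alt
  rw [pvFold_eq]
  cases hc1 : pvC labels pvG1 <;> cases hc2 : pvC labels pvG2 <;> cases hc4 : pvC labels pvG4 <;>
    simp [ne_eq, pvInter_nil_iff, hc1, hc2, hc4]
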